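-- pv_equiv track=rewrite | github.com/HuipengXu/data-structure-algorithm | binary_search.py | binary_search4_loop
-- ===== SOURCE A (Python) =====
-- def binary_search4_loop(nums: list, a):
--     low, high = 0, len(nums) - 1
--     while low <= high:
--         mid = low + ((high - low) >> 1)
--         if nums[mid] > a:
--             high = mid - 1
--         else:
--             if mid == (len(nums) - 1) or nums[mid+1] > a:
--                 return mid
--             else:
--                 low = mid + 1
--     return None
-- ===== SOURCE B (Python) =====
-- def binary_search4_loop(nums: list, a):
--     def go(low, high):
--         if low > high:
--             return None
--         mid = low + ((high - low) >> 1)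
--         if nums[mid] > a:
--             return go(low, mid - 1)
--         if mid == len(nums) - 1 or nums[mid + 1] > a:
--             return mid
--         return go(mid + 1, high)
--     return go(0, len(nums) - 1)
-- ===== Notes on version B (the rewrite author's own statement) =====
-- stated objective: alternative
-- what changed: The iterative while-loop with mutable low/high state is re-decomposed as a recursive divide-and-conquer helper go(low, high) that returns directly from each branch; the entry point just calls go(0, len(nums)-1).
import Mathlib
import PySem

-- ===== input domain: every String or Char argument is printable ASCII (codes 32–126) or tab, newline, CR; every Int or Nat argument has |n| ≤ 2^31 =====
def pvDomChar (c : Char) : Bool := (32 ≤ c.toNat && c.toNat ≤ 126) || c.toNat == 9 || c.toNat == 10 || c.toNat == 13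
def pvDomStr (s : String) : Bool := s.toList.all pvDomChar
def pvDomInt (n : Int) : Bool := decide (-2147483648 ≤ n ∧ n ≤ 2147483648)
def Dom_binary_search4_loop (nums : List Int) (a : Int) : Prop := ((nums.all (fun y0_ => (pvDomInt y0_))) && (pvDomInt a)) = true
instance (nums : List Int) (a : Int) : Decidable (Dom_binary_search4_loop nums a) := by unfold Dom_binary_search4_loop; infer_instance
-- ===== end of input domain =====

-- B rewrites A's iterative while-loop as a recursive divide-and-conquer helper on (low, high); same return value, no speed claim.

-- ===== PORT A =====
-- One iteration of A's while-loop body: either the updated (low, high) state or a returned value.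
-- '>> 1' is PySem.Int.floordiv _ 2 (high - low ≥ 0 under the loop guard, where shifting = flooring);
-- nums[mid] is in range whenever the loop reads it, so '.getD 0' is never the out-of-range arm.
def pvStepA (nums : List Int) (a : Int) (low high : Int) : (Int × Int) ⊕ Option Int :=
  let mid := low + PySem.Int.floordiv (high - low) 2
  if (PySem.List.pyGet? nums mid).getD 0 > a then
    Sum.inl (low, mid - 1)
  else if mid = (nums.length : Int) - 1 ∨ (PySem.List.pyGet? nums (mid + 1)).getD 0 > a then
    Sum.inr (some mid)
  else
    Sum.inl (mid + 1, high)

-- The while-loop: run pvStepA while low ≤ high; fuel nums.length + 1 bounds the iteration count.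
def pvRunA (nums : List Int) (a : Int) : Nat → Int × Int → Option Int
  | 0, _ => none
  | n + 1, (low, high) =>
    if low ≤ high then
      match pvStepA nums a low high with
      | Sum.inl st => pvRunA nums a n st
      | Sum.inr r => r
    else none

def binary_search4_loop (nums : List Int) (a : Int) : Option Int :=
  pvRunA nums a (nums.length + 1) (0, (nums.length : Int) - 1)

-- ===== PORT B =====
-- Recursive helper go(low, high) of Source B, branch for branch.
def pvGoB (nums : List Int) (a : Int) (low high : Int) : Option Int :=
  if h : low > high then none
  else
    let mid := low + PySem.Int.floordiv (high - low) 2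
    if (PySem.List.pyGet? nums mid).getD 0 > a then
      pvGoB nums a low (mid - 1)
    else if mid = (nums.length : Int) - 1 ∨ (PySem.List.pyGet? nums (mid + 1)).getD 0 > a then
      some mid
    else
      pvGoB nums a (mid + 1) high
termination_by (high + 1 - low).toNat
decreasing_by
  all_goals
    simp only [not_lt] at h
    rw [PySem.Int.floordiv_eq_ediv_of_pos (by omega)]
    omega

def binary_search4_loop_alt (nums : List Int) (a : Int) : Option Int :=
  pvGoB nums a 0 ((nums.length : Int) - 1)

-- ===== PRECONDITION & SPEC =====
def Spec_binary_search4_loop (nums : List Int) (a : Int) (out : Option Int) : Prop := out = binary_search4_loop_alt nums a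
instance (nums : List Int) (a : Int) (out : Option Int) : Decidable (Spec_binary_search4_loop nums a out) := by unfold Spec_binary_search4_loop; infer_instance

-- ===== CLAIM (what is proved, stated in full; the proofs are below) =====
def Claim_equal_binary_search4_loop : Prop := ∀ (nums : List Int) (a : Int), Dom_binary_search4_loop nums a → Spec_binary_search4_loop nums a (binary_search4_loop nums a)

-- ===== LEMMAS AND PROOFS =====

-- With enough fuel left, the fueled while-loop computes the recursive helper.
theorem pvRunA_eq_pvGoB (nums : List Int) (a : Int) :
    ∀ (fuel : Nat) (low high : Int), (high + 1 - low).toNat < fuel →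
      pvRunA nums a fuel (low, high) = pvGoB nums a low high := by
  intro fuel
  induction fuel with
  | zero => intro low high hf; omega
  | succ n ih =>
    intro low high hf
    rw [pvGoB]
    by_cases hle : low ≤ high
    · have hmid : low ≤ low + PySem.Int.floordiv (high - low) 2 ∧
          low + PySem.Int.floordiv (high - low) 2 ≤ high := by
        rw [PySem.Int.floordiv_eq_ediv_of_pos (by omega)]
        omega
      simp only [pvRunA, pvStepA, if_pos hle, dif_neg (by omega : ¬ low > high)]
      split_ifs with h1 h2
      · exact ih _ _ (by omega)
      · rfl
      · exact ih _ _ (by omega)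
    · simp [pvRunA, if_neg hle, dif_pos (by omega : low > high)]

-- ===== VERDICT (by name: the statement is the Claim_ definition above) =====
theorem binary_search4_loop_spec : Claim_equal_binary_search4_loop := by
  intro nums a _
  unfold Spec_binary_search4_loop binary_search4_loop binary_search4_loop_alt
  exact pvRunA_eq_pvGoB nums a _ _ _ (by omega)
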